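-- pv_equiv track=rewrite | github.com/m1981/ynab_web | modules/data_source.py | purgeCategories
-- ===== SOURCE A (Python) =====
-- class YnabError(RuntimeError): pass
--
-- def purgeCategories(data):
--     tmp = []
--     begin_category = 'Total Income'
--     ignored_categories = ['Uncategorized Transactions', 'Total Income', 'Hidden Categories', 'Total Expenses', 'Net Income']
--     if begin_category not in str(data):
--         raise YnabError('Category not found! ({})'.format(begin_category))
--
--     # Append header row
--     tmp.append(data[0])
--     skip = True
--     for cat in data:
--         # Disable skip if begin category found
--         if skip and cat[0] == begin_category:
--             skip = False
--
--         # Skip ignored categories and Category groups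
--         if skip or cat[0] in ignored_categories or '.' in cat[0]: continue
--
--         tmp.append(cat)
--     #for
--     return tmp
-- ===== SOURCE B (Python) =====
-- class YnabError(RuntimeError): pass
--
-- def purgeCategories(data):
--     begin_category = 'Total Income'
--     ignored_categories = ['Uncategorized Transactions', 'Total Income', 'Hidden Categories', 'Total Expenses', 'Net Income']
--     if begin_category not in str(data):
--         raise YnabError('Category not found! ({})'.format(begin_category))
--     start = next((i for i, cat in enumerate(data) if cat[0] == begin_category), len(data))
--     return [data[0]] + [cat for cat in data[start:]
--                         if cat[0] not in ignored_categories and '.' not in cat[0]]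
-- ===== Notes on version B (the rewrite author's own statement) =====
-- stated objective: simpler
-- what changed: Replaces the stateful skip-flag loop with a find-the-marker-index step followed by a plain filtering comprehension over the suffix data[start:].
import Mathlib
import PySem

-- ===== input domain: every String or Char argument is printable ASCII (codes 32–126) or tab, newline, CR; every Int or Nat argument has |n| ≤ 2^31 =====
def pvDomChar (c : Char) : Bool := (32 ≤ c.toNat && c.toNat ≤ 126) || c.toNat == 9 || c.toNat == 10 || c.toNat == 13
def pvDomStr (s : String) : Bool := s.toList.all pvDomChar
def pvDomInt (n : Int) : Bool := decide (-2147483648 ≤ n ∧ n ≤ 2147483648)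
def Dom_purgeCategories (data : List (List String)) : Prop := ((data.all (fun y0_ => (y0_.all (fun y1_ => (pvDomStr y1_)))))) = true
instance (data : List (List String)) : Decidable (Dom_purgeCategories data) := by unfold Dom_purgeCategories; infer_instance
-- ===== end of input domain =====

-- B replaces A's stateful skip-flag loop with find-the-marker-index then a plain filter of the suffix (same cost; return value only — neither version mutates its argument).

-- ===== PORT A =====
def pvIgnored : List String :=
  ["Uncategorized Transactions", "Total Income", "Hidden Categories", "Total Expenses", "Net Income"]

-- A's for-loop over (skip, tmp); the raise branch never fires under Pre_ and is dropped.
def purgeLoop (skip : Bool) (l : List (List String)) : List (List String) :=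
  match l with
  | [] => []
  | cat :: rest =>
    let skip := if skip && (cat.headD "" == "Total Income") then false else skip
    if skip || pvIgnored.contains (cat.headD "") || PySem.Str.isIn "." (cat.headD "") then
      purgeLoop skip rest
    else
      cat :: purgeLoop skip rest

def purgeCategories (data : List (List String)) : List (List String) :=
  data.headD [] :: purgeLoop true data

-- ===== PORT B =====
def pvKeep (cat : List String) : Bool :=
  !(pvIgnored.contains (cat.headD "")) && !(PySem.Str.isIn "." (cat.headD ""))

def purgeCategories_alt (data : List (List String)) : List (List String) :=
  let start : Nat :=
    match data.findIdx? (fun cat => cat.headD "" == "Total Income") with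
    | some i => i
    | none => data.length
  data.headD [] :: (data.drop start).filter pvKeep

-- ===== PRECONDITION & SPEC =====
-- Pre_ = exactly the inputs where Python A returns: the guard `'Total Income' in str(data)` passes
-- (the marker contains no quote/bracket/comma/backslash character, so it occurs in repr(data) iff it
-- occurs inside some cell string) and every row is nonempty (cat[0] is read for every row).
def Pre_purgeCategories (data : List (List String)) : Prop :=
  (∃ row ∈ data, ∃ cell ∈ row, PySem.Str.isIn "Total Income" cell = true) ∧
  (∀ row ∈ data, row ≠ [])
instance (data : List (List String)) : Decidable (Pre_purgeCategories data) := by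
  unfold Pre_purgeCategories; infer_instance

def pvWitness_purgeCategories : List (List String) :=
  [["Category", "Budget"], ["Total Income", "5"], ["Groceries", "3"], ["A.B", "1"]]

def Spec_purgeCategories (data : List (List String)) (out : List (List String)) : Prop := out = purgeCategories_alt data
instance (data : List (List String)) (out : List (List String)) : Decidable (Spec_purgeCategories data out) := by unfold Spec_purgeCategories; infer_instance

-- ===== CLAIM (what is proved, stated in full; the proofs are below) =====
def Claim_equal_purgeCategories : Prop := ∀ (data : List (List String)), Dom_purgeCategories data → Pre_purgeCategories data → Spec_purgeCategories data (purgeCategories data)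

-- ===== LEMMAS AND PROOFS =====
-- Once skip is False it stays False and the loop is a plain filter.
theorem purgeLoop_false (l : List (List String)) : purgeLoop false l = l.filter pvKeep := by
  induction l with
  | nil => rfl
  | cons cat rest ih =>
    by_cases h1 : cat.head?.getD "" ∈ pvIgnored
    · simp [purgeLoop, pvKeep, h1, ih]
    · by_cases h2 : PySem.Chars.isIn ['.'] (cat.head?.getD "").toList = true
      · simp [purgeLoop, pvKeep, h1, h2, ih]
      · simp [purgeLoop, pvKeep, h1, h2, ih]

-- With skip initially True the loop drops everything before the first marker row and filters the rest.
theorem purgeLoop_true (l : List (List String)) :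
    purgeLoop true l =
      (l.drop (match l.findIdx? (fun cat => cat.headD "" == "Total Income") with
               | some i => i | none => l.length)).filter pvKeep := by
  induction l with
  | nil => rfl
  | cons cat rest ih =>
    by_cases h : cat.head?.getD "" = "Total Income"
    · have hmem : ("Total Income" : String) ∈ pvIgnored := by decide
      have hk : pvKeep cat = false := by simp [pvKeep, h, hmem]
      simp [purgeLoop, List.findIdx?_cons, h, hmem, hk, purgeLoop_false]
    · rw [List.findIdx?_cons]
      cases hf : rest.findIdx? (fun cat => cat.headD "" == "Total Income") with
      | some i =>
        simp only [List.headD_eq_head?] at hf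
        simp [purgeLoop, h, ih, hf]
      | none =>
        simp only [List.headD_eq_head?] at hf
        simp [purgeLoop, h, ih, hf, List.drop_length]

-- ===== VERDICT (by name: the statement is the Claim_ definition above) =====
theorem purgeCategories_spec : Claim_equal_purgeCategories := by
  intro data _ _
  unfold Spec_purgeCategories purgeCategories purgeCategories_alt
  rw [purgeLoop_true]
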